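-- pv_equiv track=rewrite | github.com/mrbartrns/algorithm-and-structure | code_up_recur/cu_3704.py | get_step_memo
-- ===== SOURCE A (Python) =====
-- def get_step_memo(n):
--     arr = [1, 1, 2]
--     i = 3
--     while i <= n:
--         val = (arr[i - 1] + arr[i - 2] + arr[i - 3]) % 1000
--         arr.append(val)
--         i += 1
--     return arr[n]
-- ===== SOURCE B (Python) =====
-- def get_step_memo(n):
--     if n < 3:
--         return [1, 1, 2][n]
--     def mat_mul(X, Y):
--         return tuple(
--             tuple(sum(X[i][k] * Y[k][j] for k in range(3)) % 1000 for j in range(3))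
--             for i in range(3)
--         )
--     M = ((1, 1, 1), (1, 0, 0), (0, 1, 0))
--     R = ((1, 0, 0), (0, 1, 0), (0, 0, 1))
--     e = n - 2
--     while e:
--         if e & 1:
--             R = mat_mul(R, M)
--         M = mat_mul(M, M)
--         e >>= 1
--     return (R[0][0] * 2 + R[0][1] * 1 + R[0][2] * 1) % 1000
-- ===== Notes on version B (the rewrite author's own statement) =====
-- stated objective: faster
-- what changed: replaces the O(n) memo-list loop by fast 3x3 matrix exponentiation of the tribonacci recurrence mod 1000
import Mathlib
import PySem

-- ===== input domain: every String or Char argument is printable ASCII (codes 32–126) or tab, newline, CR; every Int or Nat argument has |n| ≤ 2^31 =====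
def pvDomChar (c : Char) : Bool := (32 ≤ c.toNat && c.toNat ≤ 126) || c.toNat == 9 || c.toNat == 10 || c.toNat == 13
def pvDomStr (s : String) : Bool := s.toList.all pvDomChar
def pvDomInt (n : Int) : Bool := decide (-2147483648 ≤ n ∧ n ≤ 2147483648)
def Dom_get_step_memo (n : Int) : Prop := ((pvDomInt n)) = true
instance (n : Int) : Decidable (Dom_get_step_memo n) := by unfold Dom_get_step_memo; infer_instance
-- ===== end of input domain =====

-- B replaces A's O(n) memo-list loop by fast 3x3 matrix exponentiation of the recurrence mod 1000 (O(log n)).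

-- ===== PORT A =====
-- the while loop of A: appends (arr[i-1]+arr[i-2]+arr[i-3]) % 1000 while i <= n
def pvBuild (n : Int) (arr : List Int) (i : Int) : List Int :=
  if h : i ≤ n then
    let val := PySem.Int.mod ((PySem.List.pyGet? arr (i-1)).getD 0 +
               (PySem.List.pyGet? arr (i-2)).getD 0 +
               (PySem.List.pyGet? arr (i-3)).getD 0) 1000
    pvBuild n (arr ++ [val]) (i+1)
  else arr
termination_by (n + 1 - i).toNat
decreasing_by omega

def get_step_memo (n : Int) : Int :=
  (PySem.List.pyGet? (pvBuild n [1, 1, 2] 3) n).getD 0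

-- ===== PORT B =====
structure Mat3 where
  m00 : Int
  m01 : Int
  m02 : Int
  m10 : Int
  m11 : Int
  m12 : Int
  m20 : Int
  m21 : Int
  m22 : Int
deriving Repr, DecidableEq

-- B's mat_mul: each entry is the 3-term dot product, then % 1000
def matMul (X Y : Mat3) : Mat3 :=
  ⟨PySem.Int.mod (X.m00 * Y.m00 + X.m01 * Y.m10 + X.m02 * Y.m20) 1000,
   PySem.Int.mod (X.m00 * Y.m01 + X.m01 * Y.m11 + X.m02 * Y.m21) 1000,
   PySem.Int.mod (X.m00 * Y.m02 + X.m01 * Y.m12 + X.m02 * Y.m22) 1000,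
   PySem.Int.mod (X.m10 * Y.m00 + X.m11 * Y.m10 + X.m12 * Y.m20) 1000,
   PySem.Int.mod (X.m10 * Y.m01 + X.m11 * Y.m11 + X.m12 * Y.m21) 1000,
   PySem.Int.mod (X.m10 * Y.m02 + X.m11 * Y.m12 + X.m12 * Y.m22) 1000,
   PySem.Int.mod (X.m20 * Y.m00 + X.m21 * Y.m10 + X.m22 * Y.m20) 1000,
   PySem.Int.mod (X.m20 * Y.m01 + X.m21 * Y.m11 + X.m22 * Y.m21) 1000,
   PySem.Int.mod (X.m20 * Y.m02 + X.m21 * Y.m12 + X.m22 * Y.m22) 1000⟩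

-- B's `while e:` square-and-multiply loop
def matPowLoop (R X : Mat3) (e : Nat) : Mat3 :=
  if e = 0 then R
  else matPowLoop (if e % 2 = 1 then matMul R X else R) (matMul X X) (e / 2)
termination_by e
decreasing_by omega

def get_step_memo_alt (n : Int) : Int :=
  if n < 3 then (PySem.List.pyGet? [1, 1, 2] n).getD 0
  else
    let P := matPowLoop ⟨1,0,0,0,1,0,0,0,1⟩ ⟨1,1,1,1,0,0,0,1,0⟩ (n - 2).toNat
    PySem.Int.mod (P.m00 * 2 + P.m01 * 1 + P.m02 * 1) 1000

-- ===== PRECONDITION & SPEC =====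
-- Pre_ excludes n < -3, on which A's final arr[n] (and B's [1,1,2][n]) raises IndexError.
def Pre_get_step_memo (n : Int) : Prop := -3 ≤ n
instance (n : Int) : Decidable (Pre_get_step_memo n) := by unfold Pre_get_step_memo; infer_instance
def pvWitness_get_step_memo : Int := 7

def Spec_get_step_memo (n : Int) (out : Int) : Prop := out = get_step_memo_alt n
instance (n : Int) (out : Int) : Decidable (Spec_get_step_memo n out) := by unfold Spec_get_step_memo; infer_instance

-- ===== CLAIM (what is proved, stated in full; the proofs are below) =====
def Claim_equal_get_step_memo : Prop := ∀ (n : Int), Dom_get_step_memo n → Pre_get_step_memo n → Spec_get_step_memo n (get_step_memo n)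

-- ===== LEMMAS AND PROOFS =====

-- the tribonacci-mod-1000 sequence both programs compute
def trib : Nat → Int
  | 0 => 1
  | 1 => 1
  | 2 => 2
  | (k+3) => PySem.Int.mod (trib (k+2) + trib (k+1) + trib k) 1000

theorem trib_bounds (n : Nat) : 0 ≤ trib n ∧ trib n < 1000 := by
  induction n using trib.induct with
  | case1 => simp [trib]
  | case2 => simp [trib]
  | case3 => simp [trib]
  | case4 k _ _ _ =>
    exact ⟨PySem.Int.mod_nonneg _ (by omega), PySem.Int.mod_lt _ (by omega)⟩

-- ---- A side ----

theorem build_eq (n : Int) (i : Nat) (h3 : 3 ≤ i) :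
    pvBuild n ((List.range i).map trib) (i : Int) =
      (List.range (max i (n + 1).toNat)).map trib := by
  rw [pvBuild.eq_def]
  by_cases h : (i : Int) ≤ n
  · rw [dif_pos h]
    have hget : ∀ (j : Nat) (z : Int), j < i → z = (j : Int) →
        (PySem.List.pyGet? ((List.range i).map trib) z).getD 0 = trib j := by
      intro j z hj hz
      rw [hz, PySem.List.pyGet?_natCast _ _]
      simp [hj]
    have e1 := hget (i-1) ((i : Int) - 1) (by omega) (by omega)
    have e2 := hget (i-2) ((i : Int) - 2) (by omega) (by omega)
    have e3 := hget (i-3) ((i : Int) - 3) (by omega) (by omega)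
    simp only [e1, e2, e3]
    have hval : PySem.Int.mod (trib (i-1) + trib (i-2) + trib (i-3)) 1000 = trib i := by
      have hi : i = (i - 3) + 3 := by omega
      rw [hi, trib]
      congr 1
    have happ : (List.range i).map trib ++ [trib i] = (List.range (i+1)).map trib := by
      rw [List.range_succ]; simp
    rw [hval, happ]
    have hrec := build_eq n (i + 1) (by omega)
    push_cast at hrec
    rw [hrec]
    congr 2
    omega
  · rw [dif_neg h]
    have hn' : n < (i : Int) := not_le.mp h
    have hmax : max i (n + 1).toNat = i := by omega
    rw [hmax]
termination_by (n + 1 - i).toNat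
decreasing_by omega

theorem get_step_memo_eq_trib (n : Int) (h : 3 ≤ n) :
    get_step_memo n = trib n.toNat := by
  unfold get_step_memo
  have h0 : ([1, 1, 2] : List Int) = (List.range 3).map trib := by decide
  have hb := build_eq n 3 (by omega)
  push_cast at hb
  rw [h0, hb]
  have hn : n = ((n.toNat : Nat) : Int) := by omega
  rw [hn, PySem.List.pyGet?_natCast _ _]
  have hlt : n.toNat < max 3 (n + 1).toNat := by omega
  simp
  congr 1
  omega

-- ---- B side ----

def matZ (X : Mat3) : Matrix (Fin 3) (Fin 3) (ZMod 1000) :=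
  Matrix.of ![![(X.m00 : ZMod 1000), X.m01, X.m02],
              ![(X.m10 : ZMod 1000), X.m11, X.m12],
              ![(X.m20 : ZMod 1000), X.m21, X.m22]]

set_option maxHeartbeats 1000000 in
theorem matZ_matMul (X Y : Mat3) : matZ (matMul X Y) = matZ X * matZ Y := by
  ext i j
  have hm : ∀ a : Int, ((a % 1000 : Int) : ZMod 1000) = (a : ZMod 1000) := by
    intro a
    exact_mod_cast ZMod.intCast_mod a 1000
  fin_cases i <;> fin_cases j <;>
    simp [matMul, matZ, Matrix.mul_apply, Fin.sum_univ_three, hm]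

theorem matZ_matPowLoop (R X : Mat3) (e : Nat) :
    matZ (matPowLoop R X e) = matZ R * (matZ X) ^ e := by
  rw [matPowLoop.eq_def]
  by_cases h : e = 0
  · simp [h]
  · rw [if_neg h]
    rw [matZ_matPowLoop]
    have hXX : matZ (matMul X X) = matZ X * matZ X := matZ_matMul X X
    have hsq : (matZ X * matZ X) ^ (e / 2) = (matZ X) ^ (2 * (e / 2)) := by
      rw [pow_mul, sq]
    by_cases hodd : e % 2 = 1
    · rw [if_pos hodd, matZ_matMul, hXX, hsq, mul_assoc]
      congr 1
      rw [← pow_succ']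
      congr 1
      omega
    · rw [if_neg hodd, hXX, hsq]
      congr 1
      congr 1
      omega
termination_by e
decreasing_by omega

def Mz : Matrix (Fin 3) (Fin 3) (ZMod 1000) :=
  Matrix.of ![![1,1,1],![1,0,0],![0,1,0]]

def w (k : Nat) : Fin 3 → ZMod 1000 :=
  ![((trib (k+2) : Int) : ZMod 1000), ((trib (k+1) : Int) : ZMod 1000), ((trib k : Int) : ZMod 1000)]

theorem mz_step (k : Nat) : Mz.mulVec (w k) = w (k + 1) := by
  funext i
  have hm : ∀ a : Int, ((a % 1000 : Int) : ZMod 1000) = (a : ZMod 1000) := by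
    intro a
    exact_mod_cast ZMod.intCast_mod a 1000
  fin_cases i <;>
    simp [Mz, w, Matrix.mulVec, dotProduct, Fin.sum_univ_three, trib, hm]

theorem mz_pow (e : Nat) : (Mz ^ e).mulVec (w 0) = w e := by
  induction e with
  | zero => simp
  | succ k ih =>
    rw [pow_succ', ← Matrix.mulVec_mulVec, ih, mz_step]

theorem alt_eq_trib (n : Int) (h : 3 ≤ n) :
    ((get_step_memo_alt n : Int) : ZMod 1000) = ((trib n.toNat : Int) : ZMod 1000) ∧
    0 ≤ get_step_memo_alt n ∧ get_step_memo_alt n < 1000 := by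
  unfold get_step_memo_alt
  rw [if_neg (by omega)]
  have hM : matZ ⟨1,1,1,1,0,0,0,1,0⟩ = Mz := by
    unfold matZ Mz; norm_num
  have hI : matZ ⟨1,0,0,0,1,0,0,0,1⟩ = 1 := by
    unfold matZ
    ext i j
    fin_cases i <;> fin_cases j <;> simp
  set P := matPowLoop ⟨1,0,0,0,1,0,0,0,1⟩ ⟨1,1,1,1,0,0,0,1,0⟩ (n - 2).toNat with hP
  have hPz : matZ P = Mz ^ (n - 2).toNat := by
    rw [hP, matZ_matPowLoop, hI, hM, one_mul]
  have hrow : ((P.m00 * 2 + P.m01 * 1 + P.m02 * 1 : Int) : ZMod 1000) =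
      (Mz ^ (n - 2).toNat).mulVec (w 0) 0 := by
    have h00 : (Mz ^ (n - 2).toNat) 0 0 = ((P.m00 : Int) : ZMod 1000) := by rw [← hPz]; rfl
    have h01 : (Mz ^ (n - 2).toNat) 0 1 = ((P.m01 : Int) : ZMod 1000) := by rw [← hPz]; rfl
    have h02 : (Mz ^ (n - 2).toNat) 0 2 = ((P.m02 : Int) : ZMod 1000) := by rw [← hPz]; rfl
    simp [Matrix.mulVec, dotProduct, Fin.sum_univ_three, h00, h01, h02, w, trib]
  have hm : ∀ a : Int, ((PySem.Int.mod a 1000 : Int) : ZMod 1000) = (a : ZMod 1000) := by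
    intro a
    rw [PySem.Int.mod_eq_emod_of_pos (by omega)]
    exact_mod_cast ZMod.intCast_mod a 1000
  refine ⟨?_, PySem.Int.mod_nonneg _ (by omega), PySem.Int.mod_lt _ (by omega)⟩
  rw [hm, hrow, mz_pow]
  have : (n - 2).toNat + 2 = n.toNat := by omega
  simp [w, this]

theorem int_eq_of_zmod (a b : Int) (ha : 0 ≤ a) (ha' : a < 1000) (hb : 0 ≤ b) (hb' : b < 1000)
    (h : ((a : Int) : ZMod 1000) = ((b : Int) : ZMod 1000)) : a = b := by
  rw [ZMod.intCast_eq_intCast_iff'] at h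
  simp at h
  omega

-- ===== VERDICT (by name: the statement is the Claim_ definition above) =====
theorem get_step_memo_spec : Claim_equal_get_step_memo := by
  intro n _hd hp
  unfold Spec_get_step_memo
  by_cases h : 3 ≤ n
  · have hA := get_step_memo_eq_trib n h
    obtain ⟨hz, hb0, hb1⟩ := alt_eq_trib n h
    obtain ⟨ht0, ht1⟩ := trib_bounds n.toNat
    rw [hA]
    exact (int_eq_of_zmod _ _ hb0 hb1 ht0 ht1 hz).symm
  · have hr : -3 ≤ n ∧ n < 3 := ⟨hp, by omega⟩
    have hbuild : pvBuild n [1,1,2] 3 = [1,1,2] := by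
      rw [pvBuild.eq_def, dif_neg h]
    unfold get_step_memo get_step_memo_alt
    rw [hbuild, if_pos (by omega)]
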